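-- pv_equiv track=rewrite | github.com/mackfi/sketchql-demo | sketchql-backend/data/video_data.py | get_obj_chunks
-- ===== SOURCE A (Python) =====
-- def get_obj_chunks(all_obj_frames):
--     chunks = []
--     chunk_start = all_obj_frames[0]
--     prev = all_obj_frames[0]
--     for i in range(1, len(all_obj_frames)):
--         if all_obj_frames[i] == (prev + 1):
--             prev = all_obj_frames[i]
--             continue
--         else:
--             chunks.append((chunk_start, prev))
--         chunk_start = all_obj_frames[i]
--         prev = all_obj_frames[i]
--     chunks.append((chunk_start, prev))
--     return chunks
-- ===== SOURCE B (Python) =====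
-- def get_obj_chunks(all_obj_frames):
--     # two-pointer run scan: j advances to the end of the maximal consecutive
--     # run starting at i, one (start, end) pair is emitted per run
--     chunks = []
--     n = len(all_obj_frames)
--     i = 0
--     while i < n:
--         j = i
--         while j + 1 < n and all_obj_frames[j + 1] == all_obj_frames[j] + 1:
--             j += 1
--         chunks.append((all_obj_frames[i], all_obj_frames[j]))
--         i = j + 1
--     return chunks
-- ===== Notes on version B (the rewrite author's own statement) =====
-- stated objective: alternative
-- what changed: Replaces A's single accumulator pass (chunk_start/prev state threaded through every element) by a two-pointer run scan: an inner loop advances j to the end of the maximal consecutive run starting at i and one (start,end) pair is emitted per run, with no state carried between runs.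
import Mathlib
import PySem

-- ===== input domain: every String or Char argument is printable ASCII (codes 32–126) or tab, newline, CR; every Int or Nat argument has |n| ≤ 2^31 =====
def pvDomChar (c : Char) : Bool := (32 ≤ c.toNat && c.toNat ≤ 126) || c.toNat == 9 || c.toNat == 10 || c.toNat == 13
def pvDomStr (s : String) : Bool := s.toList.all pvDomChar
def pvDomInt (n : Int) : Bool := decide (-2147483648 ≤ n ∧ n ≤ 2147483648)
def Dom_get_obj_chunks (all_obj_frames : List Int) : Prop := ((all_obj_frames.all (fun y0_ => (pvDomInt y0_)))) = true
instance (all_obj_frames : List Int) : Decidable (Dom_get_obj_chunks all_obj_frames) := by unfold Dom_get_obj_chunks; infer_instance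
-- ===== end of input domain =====

-- B replaces A's accumulator pass by a two-pointer run scan; equal results on nonempty lists (A raises IndexError on []).

-- ===== PORT A =====
-- A iterates i over range(1, len); that visits exactly the elements of the tail in order,
-- carrying (chunks, chunk_start, prev); on [] Python raises IndexError (excluded by Pre_).
def get_obj_chunks (all_obj_frames : List Int) : List (Int × Int) :=
  match all_obj_frames with
  | [] => []  -- Python: IndexError at all_obj_frames[0]; outside Pre_
  | x :: rest =>
    let st := rest.foldl
      (fun (s : List (Int × Int) × Int × Int) y =>
        if y = s.2.2 + 1 then (s.1, s.2.1, y)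
        else (s.1 ++ [(s.2.1, s.2.2)], y, y))
      ([], x, x)
    st.1 ++ [(st.2.1, st.2.2)]

-- ===== PORT B =====
-- Source B's inner while loop: advance j while j+1 < n and xs[j+1] == xs[j] + 1.
-- Indices stay in [0, n): Lean's getD with default 0 reads the same element Python's xs[j] does.
def pvAdvance (xs : List Int) (j : Nat) : Nat :=
  if h : j + 1 < xs.length ∧ xs.getD (j + 1) 0 = xs.getD j 0 + 1 then
    pvAdvance xs (j + 1)
  else j
  termination_by xs.length - j
  decreasing_by omega

theorem pvAdvance_ge (xs : List Int) (i : Nat) : i ≤ pvAdvance xs i := by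
  unfold pvAdvance
  split
  · have := pvAdvance_ge xs (i + 1); omega
  · exact Nat.le_refl i
  termination_by xs.length - i
  decreasing_by omega

-- Source B's outer while loop: emit (xs[i], xs[j]) per run, continue at i = j + 1.
def pvOuter (xs : List Int) (i : Nat) (chunks : List (Int × Int)) : List (Int × Int) :=
  if h : i < xs.length then
    pvOuter xs (pvAdvance xs i + 1) (chunks ++ [(xs.getD i 0, xs.getD (pvAdvance xs i) 0)])
  else chunks
  termination_by xs.length - i
  decreasing_by have := pvAdvance_ge xs i; omega

def get_obj_chunks_alt (all_obj_frames : List Int) : List (Int × Int) :=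
  pvOuter all_obj_frames 0 []

-- ===== PRECONDITION & SPEC =====
-- Pre_ excludes exactly the empty list, on which A raises IndexError (B returns [] there).
def Pre_get_obj_chunks (all_obj_frames : List Int) : Prop := all_obj_frames ≠ []
instance (all_obj_frames : List Int) : Decidable (Pre_get_obj_chunks all_obj_frames) := by
  unfold Pre_get_obj_chunks; infer_instance
def pvWitness_get_obj_chunks : List Int := [1, 2, 3, 7, 9, 10]

def Spec_get_obj_chunks (all_obj_frames : List Int) (out : List (Int × Int)) : Prop :=
  out = get_obj_chunks_alt all_obj_frames
instance (all_obj_frames : List Int) (out : List (Int × Int)) : Decidable (Spec_get_obj_chunks all_obj_frames out) := by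
  unfold Spec_get_obj_chunks; infer_instance

-- ===== CLAIM (what is proved, stated in full; the proofs are below) =====
def Claim_equal_get_obj_chunks : Prop := ∀ (all_obj_frames : List Int), Dom_get_obj_chunks all_obj_frames → Pre_get_obj_chunks all_obj_frames → Spec_get_obj_chunks all_obj_frames (get_obj_chunks all_obj_frames)

-- ===== LEMMAS AND PROOFS =====

-- Bridge: a structural run-splitter both ports are shown equal to.
def pvRunSplit : Int → List Int → Int × List Int
  | cur, [] => (cur, [])
  | cur, y :: ys => if y = cur + 1 then pvRunSplit y ys else (cur, y :: ys)

theorem pvRunSplit_len (cur : Int) (ys : List Int) :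
    (pvRunSplit cur ys).2.length ≤ ys.length := by
  induction ys generalizing cur with
  | nil => simp [pvRunSplit]
  | cons y ys ih =>
    simp only [pvRunSplit]
    split
    · exact le_trans (ih y) (Nat.le_succ _)
    · simp

def pvChunksRec : List Int → List (Int × Int)
  | [] => []
  | x :: rest =>
    (x, (pvRunSplit x rest).1) :: pvChunksRec (pvRunSplit x rest).2
  termination_by xs => xs.length
  decreasing_by
    simpa using Nat.lt_succ_of_le (pvRunSplit_len x rest)

-- A's fold from state (acc, cs, prev) produces acc, then the chunk (cs, end of prev's run),
-- then the bridge's chunks of the remainder.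
theorem foldA_eq (rest : List Int) : ∀ (acc : List (Int × Int)) (cs prev : Int),
    ((fun st : List (Int × Int) × Int × Int => st.1 ++ [(st.2.1, st.2.2)])
      (rest.foldl
        (fun (s : List (Int × Int) × Int × Int) y =>
          if y = s.2.2 + 1 then (s.1, s.2.1, y)
          else (s.1 ++ [(s.2.1, s.2.2)], y, y))
        (acc, cs, prev)))
    = acc ++ (cs, (pvRunSplit prev rest).1) :: pvChunksRec (pvRunSplit prev rest).2 := by
  induction rest with
  | nil => intro acc cs prev; simp [pvRunSplit, pvChunksRec]
  | cons y ys ih =>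
    intro acc cs prev
    simp only [List.foldl_cons, pvRunSplit]
    by_cases h : y = prev + 1
    · simpa [h] using ih acc cs y
    · simp only [if_neg h]
      rw [show pvChunksRec (y :: ys) = (y, (pvRunSplit y ys).1) :: pvChunksRec (pvRunSplit y ys).2 from by rw [pvChunksRec]]
      simpa using ih (acc ++ [(cs, prev)]) y y

theorem pvAdvance_lt (xs : List Int) (i : Nat) (hi : i < xs.length) :
    pvAdvance xs i < xs.length := by
  unfold pvAdvance
  split
  · next h => exact pvAdvance_lt xs (i + 1) h.1
  · exact hi
  termination_by xs.length - i
  decreasing_by omega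

-- pvAdvance against the bridge: the run starting at index i ends at index pvAdvance xs i,
-- and what remains of the list is the drop past it.
theorem pvAdvance_runSplit (xs : List Int) (i : Nat) (hi : i < xs.length) :
    pvRunSplit (xs.getD i 0) (xs.drop (i + 1))
      = (xs.getD (pvAdvance xs i) 0, xs.drop (pvAdvance xs i + 1)) := by
  unfold pvAdvance
  split
  · next h =>
    rw [List.drop_eq_getElem_cons h.1]
    simp only [pvRunSplit]
    rw [if_pos]
    · rw [show (xs[i + 1]'h.1 : Int) = xs.getD (i + 1) 0 from (List.getD_eq_getElem xs 0 h.1).symm]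
      exact pvAdvance_runSplit xs (i + 1) h.1
    · have := List.getD_eq_getElem xs 0 h.1
      rw [← this]; exact h.2
  · next h =>
    by_cases hb : i + 1 < xs.length
    · rw [List.drop_eq_getElem_cons hb]
      simp only [pvRunSplit]
      rw [if_neg]
      intro hc
      exact h ⟨hb, by rw [List.getD_eq_getElem xs 0 hb]; exact hc⟩
    · rw [List.drop_eq_nil_of_le (by omega)]
      simp [pvRunSplit]
  termination_by xs.length - i
  decreasing_by omega

-- Source B's outer loop equals the bridge on the remaining suffix.
theorem pvOuter_eq (xs : List Int) (i : Nat) (chunks : List (Int × Int)) :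
    pvOuter xs i chunks = chunks ++ pvChunksRec (xs.drop i) := by
  unfold pvOuter
  split
  · next h =>
    rw [pvOuter_eq xs (pvAdvance xs i + 1)]
    rw [List.drop_eq_getElem_cons h]
    rw [show pvChunksRec (xs[i] :: xs.drop (i + 1))
          = (xs[i], (pvRunSplit xs[i] (xs.drop (i + 1))).1)
            :: pvChunksRec (pvRunSplit xs[i] (xs.drop (i + 1))).2 from by rw [pvChunksRec]]
    rw [← List.getD_eq_getElem xs 0 h, pvAdvance_runSplit xs i h]
    simp
  · next h =>
    rw [List.drop_eq_nil_of_le (by omega)]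
    simp [pvChunksRec]
  termination_by xs.length - i
  decreasing_by have := pvAdvance_ge xs i; omega

-- ===== VERDICT (by name: the statement is the Claim_ definition above) =====
theorem get_obj_chunks_spec : Claim_equal_get_obj_chunks := by
  intro xs _ hpre
  show get_obj_chunks xs = get_obj_chunks_alt xs
  rw [get_obj_chunks_alt, pvOuter_eq, List.drop_zero, List.nil_append]
  match xs with
  | [] => exact absurd rfl hpre
  | x :: rest =>
    rw [show pvChunksRec (x :: rest)
          = (x, (pvRunSplit x rest).1) :: pvChunksRec (pvRunSplit x rest).2 from by rw [pvChunksRec]]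
    simpa using foldA_eq rest [] x x
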